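-- pv_equiv track=rewrite | github.com/HarrisonDlgf/espn-draft-tracker | src/utils/snake_draft_calculator.py | calculate_snake_draft_picks
-- ===== SOURCE A (Python) =====
-- def calculate_snake_draft_picks(draft_slot, total_teams, rounds=15):
--     picks = []
--
--     for round_num in range(1, rounds + 1):
--         if round_num % 2 == 1:
--             pick_number = (round_num - 1) * total_teams + draft_slot + 1
--         else:
--             pick_number = round_num * total_teams - draft_slot
--
--         picks.append(pick_number)
--
--     return picks
-- ===== SOURCE B (Python) =====
-- def calculate_snake_draft_picks(draft_slot, total_teams, rounds=15):
--     if rounds <= 0: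
--         return []
--     pick = draft_slot + 1
--     picks = [pick]
--     delta_a = 2 * total_teams - 2 * draft_slot - 1  # odd round -> next even round
--     delta_b = 2 * draft_slot + 1                    # even round -> next odd round
--     for i in range(rounds - 1):
--         pick += delta_a if i % 2 == 0 else delta_b
--         picks.append(pick)
--     return picks
-- ===== Notes on version B (the rewrite author's own statement) =====
-- stated objective: alternative
-- what changed: Replaces the per-round parity branch with two independent closed-form formulas by a stateful single accumulator: start at draft_slot+1 and alternately add the two snake deltas (2*total_teams-2*draft_slot-1 and 2*draft_slot+1), appending the running pick each step.
import Mathlib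
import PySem

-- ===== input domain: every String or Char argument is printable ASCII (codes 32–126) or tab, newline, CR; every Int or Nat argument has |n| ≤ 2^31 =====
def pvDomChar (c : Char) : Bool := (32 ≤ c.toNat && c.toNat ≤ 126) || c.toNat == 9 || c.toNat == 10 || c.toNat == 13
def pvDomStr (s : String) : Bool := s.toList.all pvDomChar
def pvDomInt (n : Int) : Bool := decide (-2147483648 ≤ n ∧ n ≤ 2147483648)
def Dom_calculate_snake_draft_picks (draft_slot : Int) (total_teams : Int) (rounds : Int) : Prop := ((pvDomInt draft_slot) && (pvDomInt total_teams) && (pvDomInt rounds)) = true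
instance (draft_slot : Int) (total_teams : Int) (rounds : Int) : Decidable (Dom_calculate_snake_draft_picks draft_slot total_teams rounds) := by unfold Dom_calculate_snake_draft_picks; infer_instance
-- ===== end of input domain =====

-- B replaces A's per-round parity branch (two closed forms) with a single running
-- accumulator that alternately adds the two snake deltas (objective: alternative).

-- ===== PORT A =====
def calculate_snake_draft_picks (draft_slot : Int) (total_teams : Int) (rounds : Int) : List Int :=
  (PySem.List.pyRange 1 (rounds + 1) 1).foldl
    (fun picks round_num =>
      picks ++ [if PySem.Int.mod round_num 2 == 1
                then (round_num - 1) * total_teams + draft_slot + 1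
                else round_num * total_teams - draft_slot]) []

-- ===== PORT B =====
-- the 'for i in range(rounds-1)' loop of Source B, carrying the running pick
def snakeLoop (delta_a delta_b : Int) : Nat → Nat → Int → List Int
  | 0, _, _ => []
  | n + 1, i, pick =>
    let pick' := pick + (if i % 2 == 0 then delta_a else delta_b)
    pick' :: snakeLoop delta_a delta_b n (i + 1) pick'

def calculate_snake_draft_picks_alt (draft_slot : Int) (total_teams : Int) (rounds : Int) : List Int :=
  if rounds ≤ 0 then []
  else
    (draft_slot + 1) ::
      snakeLoop (2 * total_teams - 2 * draft_slot - 1) (2 * draft_slot + 1)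
        (rounds - 1).toNat 0 (draft_slot + 1)

-- ===== PRECONDITION & SPEC =====
def Spec_calculate_snake_draft_picks (draft_slot : Int) (total_teams : Int) (rounds : Int) (out : List Int) : Prop := out = calculate_snake_draft_picks_alt draft_slot total_teams rounds
instance (draft_slot : Int) (total_teams : Int) (rounds : Int) (out : List Int) : Decidable (Spec_calculate_snake_draft_picks draft_slot total_teams rounds out) := by unfold Spec_calculate_snake_draft_picks; infer_instance

-- ===== CLAIM (what is proved, stated in full; the proofs are below) =====
def Claim_equal_calculate_snake_draft_picks : Prop := ∀ (draft_slot : Int) (total_teams : Int) (rounds : Int), Dom_calculate_snake_draft_picks draft_slot total_teams rounds → Spec_calculate_snake_draft_picks draft_slot total_teams rounds (calculate_snake_draft_picks draft_slot total_teams rounds)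

-- ===== LEMMAS AND PROOFS =====

-- closed form for the pick of 0-indexed round k
def snakeF (s T : Int) (k : Nat) : Int :=
  if k % 2 = 0 then (k : Int) * T + s + 1 else ((k : Int) + 1) * T - s

theorem snakeF_succ (s T : Int) (i : Nat) :
    snakeF s T i + (if i % 2 == 0 then 2 * T - 2 * s - 1 else 2 * s + 1) = snakeF s T (i + 1) := by
  unfold snakeF
  rcases Nat.even_or_odd i with h | h
  · have h0 : i % 2 = 0 := Nat.even_iff.mp h
    have h1 : (i + 1) % 2 = 1 := by omega
    simp [h0, h1]
    ring
  · have h0 : i % 2 = 1 := Nat.odd_iff.mp h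
    have h1 : (i + 1) % 2 = 0 := by omega
    simp [h0, h1]
    ring

theorem snakeLoop_eq (s T : Int) (n i : Nat) :
    snakeLoop (2 * T - 2 * s - 1) (2 * s + 1) n i (snakeF s T i)
      = (List.range n).map (fun j => snakeF s T (i + 1 + j)) := by
  induction n generalizing i with
  | zero => simp [snakeLoop]
  | succ n ih =>
    rw [List.range_succ_eq_map]
    simp only [snakeLoop, List.map_cons, List.map_map]
    rw [snakeF_succ, ih (i + 1)]
    congr 1
    apply List.map_congr_left
    intro j _
    simp only [Function.comp_apply, Nat.succ_eq_add_one]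
    have hj : i + 1 + 1 + j = i + 1 + (j + 1) := by omega
    rw [hj]

theorem alt_closed (s T r : Int) :
    calculate_snake_draft_picks_alt s T r = (List.range r.toNat).map (snakeF s T) := by
  unfold calculate_snake_draft_picks_alt
  split_ifs with h
  · have : r.toNat = 0 := by omega
    simp [this]
  · have hF0 : snakeF s T 0 = s + 1 := by simp [snakeF]
    rw [← hF0, snakeLoop_eq]
    have hr : r.toNat = (r - 1).toNat + 1 := by omega
    rw [hr, List.range_succ_eq_map]
    simp only [List.map_cons, List.map_map]
    congr 1
    apply List.map_congr_left
    intro j _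
    simp only [Function.comp_apply, Nat.succ_eq_add_one]
    have hj : 0 + 1 + j = j + 1 := by omega
    rw [hj]

theorem a_elem (s T : Int) (k : Nat) :
    (if PySem.Int.mod (1 + (k : Int)) 2 == 1
     then (1 + (k : Int) - 1) * T + s + 1
     else (1 + (k : Int)) * T - s) = snakeF s T k := by
  rw [PySem.Int.mod_eq_emod_of_pos (by norm_num : (0:Int) < 2)]
  unfold snakeF
  by_cases h0 : k % 2 = 0
  · have hm : (1 + (k : Int)) % 2 = 1 := by omega
    rw [if_pos (by simp [hm]), if_pos h0]
    ring
  · have hm : ¬ ((1 + (k : Int)) % 2 = 1) := by omega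
    rw [if_neg (by simp [hm]), if_neg h0]
    ring

theorem a_closed (s T r : Int) :
    calculate_snake_draft_picks s T r = (List.range r.toNat).map (snakeF s T) := by
  unfold calculate_snake_draft_picks
  rw [PySem.List.foldl_append_singleton_eq_map, PySem.List.pyRange_one]
  have : (r + 1 - 1).toNat = r.toNat := by omega
  rw [this, List.map_map]
  simp only [List.nil_append]
  apply List.map_congr_left
  intro k _
  simpa [Function.comp] using a_elem s T k

-- ===== VERDICT (by name: the statement is the Claim_ definition above) =====
theorem calculate_snake_draft_picks_spec : Claim_equal_calculate_snake_draft_picks := by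
  intro s T r _
  unfold Spec_calculate_snake_draft_picks
  rw [a_closed, alt_closed]
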